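-- pv_equiv track=rewrite | github.com/henrifranck/scolary_v2 | scolary_v2/scripts/migration_script.py | dedupe_keyunique
-- ===== SOURCE A (Python) =====
-- from typing import Any, Dict, Iterable, List, Optional, Tuple
--
-- def dedupe_keyunique(value: Optional[str], row_id: Any, seen: set) -> Optional[str]:
--     if not value:
--         return None
--     if value not in seen:
--         seen.add(value)
--         return value
--     candidate = f"{value}-{row_id}"
--     if candidate in seen:
--         suffix = 1
--         while f"{candidate}-{suffix}" in seen:
--             suffix += 1
--         candidate = f"{candidate}-{suffix}"
--     seen.add(candidate)
--     return candidate
-- ===== SOURCE B (Python) =====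
-- from typing import Any, Optional
--
-- def dedupe_keyunique(value: Optional[str], row_id: Any, seen: set) -> Optional[str]:
--     # One classifying pass over `seen` (membership flags + the set of already-used
--     # suffix strings under this value/row_id tag), then the free suffix is picked
--     # from that extracted set instead of probing candidate strings against `seen`.
--     if not value:
--         return None
--     pre = f"{value}-{row_id}"
--     tag = pre + "-"
--     value_taken = False
--     pre_taken = False
--     rests = set()
--     for x in seen:
--         if x == value:
--             value_taken = True
--         elif x == pre:
--             pre_taken = True
--         elif x.startswith(tag):
--             rests.add(x[len(tag):])
--     if not value_taken:
--         result = value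
--     elif not pre_taken:
--         result = pre
--     else:
--         n = 1
--         while str(n) in rests:
--             n += 1
--         result = tag + str(n)
--     seen.add(result)
--     return result
-- ===== Notes on version B (the rewrite author's own statement) =====
-- stated objective: alternative
-- what changed: Instead of probing candidate strings (value, value-id, value-id-1, ...) one by one against `seen`, B makes one classifying pass over `seen` extracting two membership flags and the set of suffix strings already used under the value-id tag, then picks the first free numeric suffix from that extracted set.
import Mathlib
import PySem

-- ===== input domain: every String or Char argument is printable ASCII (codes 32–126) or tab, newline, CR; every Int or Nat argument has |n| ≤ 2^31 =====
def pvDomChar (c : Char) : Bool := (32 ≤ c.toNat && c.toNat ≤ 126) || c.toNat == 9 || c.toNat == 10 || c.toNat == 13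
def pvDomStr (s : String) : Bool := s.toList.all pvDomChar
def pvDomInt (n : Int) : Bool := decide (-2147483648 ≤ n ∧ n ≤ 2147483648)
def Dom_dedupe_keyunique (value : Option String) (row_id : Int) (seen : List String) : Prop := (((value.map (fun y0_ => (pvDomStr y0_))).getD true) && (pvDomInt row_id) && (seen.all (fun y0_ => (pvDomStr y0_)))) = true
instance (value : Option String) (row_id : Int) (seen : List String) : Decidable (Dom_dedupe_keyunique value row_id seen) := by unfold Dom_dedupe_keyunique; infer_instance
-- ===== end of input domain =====

-- B replaces A's probe-candidates-against-seen scheme by one classifying pass over `seen`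
-- (membership flags + the set of used suffix strings under the value-id tag) followed by a
-- mex-style search in that extracted set; equal return value everywhere (both Pythons also
-- add the returned string to `seen` in the same way; the theorems are about the return value).


-- ===== PORT A =====
-- the 'while f"{candidate}-{suffix}" in seen: suffix += 1' loop; fuel |seen|+1 is enough
-- because the probed strings are pairwise distinct (fuel exhaustion is unreachable)
def dedupeLoopA (candidate : String) (seen : List String) (suffix : Int) : Nat → String
  | 0 => candidate ++ "-" ++ PySem.Int.toStr suffix
  | f + 1 =>
    if candidate ++ "-" ++ PySem.Int.toStr suffix ∈ seen then
      dedupeLoopA candidate seen (suffix + 1) f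
    else
      candidate ++ "-" ++ PySem.Int.toStr suffix

def dedupe_keyunique (value : Option String) (row_id : Int) (seen : List String) : Option String :=
  match value with
  | none => none
  | some v =>
    if v = "" then none
    else if v ∉ seen then some v
    else
      let candidate := v ++ "-" ++ PySem.Int.toStr row_id
      if candidate ∈ seen then
        some (dedupeLoopA candidate seen 1 (seen.length + 1))
      else
        some candidate

-- ===== PORT B =====
-- the 'while str(n) in rests: n += 1' loop; same fuel bound |seen|+1 (rests ⊆ stripped seen)
def mexLoopB (rests : List String) (n : Int) : Nat → String
  | 0 => PySem.Int.toStr n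
  | f + 1 =>
    if PySem.Int.toStr n ∈ rests then mexLoopB rests (n + 1) f
    else PySem.Int.toStr n

-- the classifying 'for x in seen' pass of Source B
def scanB (v pre tag : String) (seen : List String) : Bool × Bool × PySem.Set String :=
  seen.foldl (fun acc x =>
    if x = v then (true, acc.2.1, acc.2.2)
    else if x = pre then (acc.1, true, acc.2.2)
    else if PySem.Str.startswith x tag then
      (acc.1, acc.2.1, PySem.Set.add acc.2.2 (PySem.Str.slice x (some (PySem.Str.len tag)) none))
    else acc) (false, false, PySem.Set.empty)

def dedupe_keyunique_alt (value : Option String) (row_id : Int) (seen : List String) : Option String :=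
  match value with
  | none => none
  | some v =>
    if v = "" then none
    else
      let pre := v ++ "-" ++ PySem.Int.toStr row_id
      let tag := pre ++ "-"
      let st := scanB v pre tag seen
      if st.1 = false then some v
      else if st.2.1 = false then some pre
      else some (tag ++ mexLoopB st.2.2 1 (seen.length + 1))

-- ===== PRECONDITION & SPEC =====
def Spec_dedupe_keyunique (value : Option String) (row_id : Int) (seen : List String) (out : Option String) : Prop := out = dedupe_keyunique_alt value row_id seen
instance (value : Option String) (row_id : Int) (seen : List String) (out : Option String) : Decidable (Spec_dedupe_keyunique value row_id seen out) := by unfold Spec_dedupe_keyunique; infer_instance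

-- ===== CLAIM (what is proved, stated in full; the proofs are below) =====
def Claim_equal_dedupe_keyunique : Prop := ∀ (value : Option String) (row_id : Int) (seen : List String), Dom_dedupe_keyunique value row_id seen → Spec_dedupe_keyunique value row_id seen (dedupe_keyunique value row_id seen)

-- ===== LEMMAS AND PROOFS =====
-- stripping the tag off a tagged string gives back the rest (Source B's x[len(tag):])
lemma strip_append (tag r : String) :
    PySem.Str.slice (tag ++ r) (some (PySem.Str.len tag)) none = r := by
  apply String.toList_injective
  have hlen : PySem.Str.len tag = ((tag.toList.length : Nat) : Int) := by simp [pysem]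
  rw [hlen]
  simp [pysem, PySem.List.slice_from_natCast, String.toList_append]

-- the classifying pass of Source B, characterised: two ORed flags and the fold of Set.add
-- over the filtered, tag-stripped elements
lemma scanB_spec (v pre tag : String) (seen : List String) (acc : Bool × Bool × PySem.Set String) :
    seen.foldl (fun acc x =>
      if x = v then (true, acc.2.1, acc.2.2)
      else if x = pre then (acc.1, true, acc.2.2)
      else if PySem.Str.startswith x tag then
        (acc.1, acc.2.1, PySem.Set.add acc.2.2 (PySem.Str.slice x (some (PySem.Str.len tag)) none))
      else acc) acc
    = (acc.1 || seen.any (fun x => x == v),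
       acc.2.1 || seen.any (fun x => !(x == v) && (x == pre)),
       (seen.filter (fun x => !(x == v) && !(x == pre) && PySem.Str.startswith x tag)).foldl
         (fun s x => PySem.Set.add s (PySem.Str.slice x (some (PySem.Str.len tag)) none)) acc.2.2) := by
  induction seen generalizing acc with
  | nil => simp
  | cons x xs ih =>
    rw [List.foldl_cons]
    by_cases hv : x = v
    · rw [if_pos hv, ih]
      subst hv
      simp
    · have hv' : (x == v) = false := by simp [hv]
      by_cases hp : x = pre
      · rw [if_neg hv, if_pos hp, ih]
        subst hp
        simp [hv']
      · have hp' : (x == pre) = false := by simp [hp]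
        by_cases hs : PySem.Str.startswith x tag = true
        · rw [if_neg hv, if_neg hp, if_pos hs, ih]
          rw [PySem.Str.startswith_eq] at hs
          simp [hv', hp', hs, List.any_cons]
        · rw [if_neg hv, if_neg hp, if_neg hs, ih]
          simp only [Bool.not_eq_true] at hs
          rw [PySem.Str.startswith_eq] at hs
          simp [hv', hp', hs, List.any_cons]

-- membership in the extracted suffix set = membership of the tagged string in seen
lemma mem_scan_iff (v pre tag : String) (seen : List String)
    (hne : ∀ r : String, tag ++ r ≠ v ∧ tag ++ r ≠ pre) (r : String) :
    r ∈ (scanB v pre tag seen).2.2 ↔ tag ++ r ∈ seen := by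
  unfold scanB
  rw [scanB_spec]
  have hfold : (seen.filter (fun x => !(x == v) && !(x == pre) && PySem.Str.startswith x tag)).foldl
      (fun s x => PySem.Set.add s (PySem.Str.slice x (some (PySem.Str.len tag)) none))
      (PySem.Set.empty : PySem.Set String)
      = PySem.Set.ofList ((seen.filter (fun x => !(x == v) && !(x == pre) && PySem.Str.startswith x tag)).map
          (fun x => PySem.Str.slice x (some (PySem.Str.len tag)) none)) := by
    rw [PySem.Set.ofList_eq_foldl, List.foldl_map]
    rfl
  simp only [hfold, PySem.Set.mem_ofList, List.mem_map, List.mem_filter]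
  constructor
  · rintro ⟨x, ⟨hxs, hq⟩, hstrip⟩
    have hsw : PySem.Str.startswith x tag = true := by
      simp only [Bool.and_eq_true] at hq
      exact hq.2
    have hpre : tag.toList <+: x.toList := by
      rw [PySem.Str.startswith_eq, PySem.Chars.startswith_iff] at hsw
      exact hsw
    obtain ⟨u, hu⟩ := hpre
    have hx : x = tag ++ r := by
      apply String.toList_injective
      have hlen : PySem.Str.len tag = ((tag.toList.length : Nat) : Int) := by simp [pysem]
      have h2 : (PySem.Str.slice x (some (PySem.Str.len tag)) none).toList = u := by
        rw [hlen]
        simp [pysem, PySem.List.slice_from_natCast, ← hu]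
      rw [hstrip] at h2
      rw [String.toList_append, ← hu, ← h2]
    rw [← hx]
    exact hxs
  · intro hmem
    refine ⟨tag ++ r, ⟨hmem, ?_⟩, strip_append tag r⟩
    have h12 := hne r
    simp [h12.1, h12.2]
    rw [PySem.Chars.startswith_iff]
    exact List.prefix_append _ _

-- A's suffix-probing loop equals tag ++ B's mex loop over the extracted set
lemma loopA_eq_mex (pre : String) (seen rests : List String)
    (hiff : ∀ r : String, r ∈ rests ↔ pre ++ "-" ++ r ∈ seen) :
    ∀ (f : Nat) (n : Int),
      dedupeLoopA pre seen n f = pre ++ "-" ++ mexLoopB rests n f := by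
  intro f
  induction f with
  | zero => intro n; simp [dedupeLoopA, mexLoopB]
  | succ f ih =>
    intro n
    simp only [dedupeLoopA, mexLoopB]
    by_cases h : PySem.Int.toStr n ∈ rests
    · rw [if_pos ((hiff _).1 h), if_pos h, ih]
    · rw [if_neg (fun hc => h ((hiff _).2 hc)), if_neg h]

lemma main_some (v : String) (row_id : Int) (seen : List String) (hv : ¬ v = "") :
    dedupe_keyunique (some v) row_id seen = dedupe_keyunique_alt (some v) row_id seen := by
  have hlenpre : v.toList.length < (v ++ "-" ++ PySem.Int.toStr row_id).toList.length := by
    simp [String.toList_append]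
  have hprev : ¬ ((v ++ "-" ++ PySem.Int.toStr row_id) = v) := by
    intro e
    rw [e] at hlenpre
    omega
  have hne : ∀ r : String,
      (v ++ "-" ++ PySem.Int.toStr row_id) ++ "-" ++ r ≠ v ∧
      (v ++ "-" ++ PySem.Int.toStr row_id) ++ "-" ++ r ≠ (v ++ "-" ++ PySem.Int.toStr row_id) := by
    intro r
    constructor <;> intro e
    · have h := congrArg (fun s => s.toList.length) e
      simp [String.toList_append] at h
    · have h := congrArg (fun s => s.toList.length) e
      simp [String.toList_append] at h
  have hscan := scanB_spec v (v ++ "-" ++ PySem.Int.toStr row_id)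
      ((v ++ "-" ++ PySem.Int.toStr row_id) ++ "-") seen (false, false, PySem.Set.empty)
  have h1 : (scanB v (v ++ "-" ++ PySem.Int.toStr row_id)
      ((v ++ "-" ++ PySem.Int.toStr row_id) ++ "-") seen).1
      = seen.any (fun x => x == v) := by
    unfold scanB
    rw [hscan]
    rfl
  have h2 : (scanB v (v ++ "-" ++ PySem.Int.toStr row_id)
      ((v ++ "-" ++ PySem.Int.toStr row_id) ++ "-") seen).2.1
      = seen.any (fun x => !(x == v) && (x == v ++ "-" ++ PySem.Int.toStr row_id)) := by
    unfold scanB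
    rw [hscan]
    rfl
  have hany1 : (seen.any (fun x => x == v) = true) ↔ v ∈ seen := by
    simp
  have hany2 : (seen.any (fun x => !(x == v) && (x == v ++ "-" ++ PySem.Int.toStr row_id)) = true)
      ↔ (v ++ "-" ++ PySem.Int.toStr row_id) ∈ seen := by
    simp only [List.any_eq_true, Bool.and_eq_true, Bool.not_eq_eq_eq_not, Bool.not_true,
      beq_eq_false_iff_ne, ne_eq, beq_iff_eq]
    constructor
    · rintro ⟨x, hx, _, he⟩
      rw [← he]
      exact hx
    · intro h
      exact ⟨_, h, hprev, rfl⟩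
  simp only [dedupe_keyunique, dedupe_keyunique_alt, if_neg hv]
  by_cases h0 : v ∈ seen
  · by_cases hc : (v ++ "-" ++ PySem.Int.toStr row_id) ∈ seen
    · rw [if_neg (by simpa using h0), if_pos hc]
      rw [if_neg (by rw [h1]; simp [hany1.2 h0]),
          if_neg (by rw [h2]; simp [hany2.2 hc])]
      rw [loopA_eq_mex (v ++ "-" ++ PySem.Int.toStr row_id) seen _
           (fun r => mem_scan_iff v (v ++ "-" ++ PySem.Int.toStr row_id)
               ((v ++ "-" ++ PySem.Int.toStr row_id) ++ "-") seen hne r)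
           (seen.length + 1) 1]
    · rw [if_neg (by simpa using h0), if_neg hc]
      rw [if_neg (by rw [h1]; simp [hany1.2 h0]),
          if_pos (by rw [h2, ← Bool.not_eq_true]; intro hx; exact hc (hany2.1 hx))]
  · rw [if_pos (by simpa using h0)]
    rw [if_pos (by rw [h1, ← Bool.not_eq_true]; intro hx; exact h0 (hany1.1 hx))]


-- ===== VERDICT (by name: the statement is the Claim_ definition above) =====
theorem dedupe_keyunique_spec : Claim_equal_dedupe_keyunique := by
  unfold Claim_equal_dedupe_keyunique Spec_dedupe_keyunique
  intro value row_id seen _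
  cases value with
  | none => rfl
  | some v =>
    by_cases hv : v = ""
    · simp [dedupe_keyunique, dedupe_keyunique_alt, hv]
    · exact main_some v row_id seen hv
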